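-- pv_equiv track=rewrite | github.com/saymrwulf/autoresearch-quantum | src/autoresearch_quantum/execution/analysis.py | sampler_memory_records
-- ===== SOURCE A (Python) =====
-- def sampler_memory_records(bitstrings_by_register: dict[str, list[str]]) -> list[dict[str, str]]:
--     first_key = next(iter(bitstrings_by_register), None)
--     if first_key is None:
--         return []
--     shots = len(bitstrings_by_register[first_key])
--     records: list[dict[str, str]] = []
--     for shot_index in range(shots):
--         records.append(
--             {name: bitstrings[shot_index] for name, bitstrings in bitstrings_by_register.items()}
--         )
--     return records
-- ===== SOURCE B (Python) =====
-- def sampler_memory_records(bitstrings_by_register: dict[str, list[str]]) -> list[dict[str, str]]: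
--     names = list(bitstrings_by_register)
--     if not names:
--         return []
--
--     def peel(columns: list[list[str]], shots: int) -> list[dict[str, str]]:
--         if shots == 0:
--             return []
--         record = dict(zip(names, [col[0] for col in columns]))
--         return [record] + peel([col[1:] for col in columns], shots - 1)
--
--     columns = list(bitstrings_by_register.values())
--     return peel(columns, len(columns[0]))
-- ===== Notes on version B (the rewrite author's own statement) =====
-- stated objective: alternative
-- what changed: B transposes by structural recursion with no shot indexing: each step peels the head of every register column into one record and recurses on the sliced tails (col[1:]) with a decrementing shot counter, instead of A's loop over shot indices that indexes each register; Pre_ excludes duplicate register names (not representable as a Python dict) and registers shorter than the first (both A and B raise IndexError there).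
import Mathlib
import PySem

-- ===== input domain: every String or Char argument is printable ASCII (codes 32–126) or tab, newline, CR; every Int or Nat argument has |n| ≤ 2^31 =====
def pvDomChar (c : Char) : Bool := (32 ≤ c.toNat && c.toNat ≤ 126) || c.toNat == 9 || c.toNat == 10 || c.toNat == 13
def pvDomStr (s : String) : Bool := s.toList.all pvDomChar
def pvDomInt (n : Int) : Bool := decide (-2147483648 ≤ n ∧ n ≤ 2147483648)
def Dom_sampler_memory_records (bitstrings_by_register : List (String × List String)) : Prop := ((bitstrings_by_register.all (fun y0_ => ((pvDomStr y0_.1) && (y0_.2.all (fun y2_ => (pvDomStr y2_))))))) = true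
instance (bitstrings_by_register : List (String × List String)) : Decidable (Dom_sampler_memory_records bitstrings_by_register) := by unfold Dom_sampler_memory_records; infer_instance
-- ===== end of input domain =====

-- B transposes by structural recursion: each step peels the head of every column into one
-- record and recurses on the sliced tails, with no shot indexing ("alternative", same cost).
-- A mutates nothing observable; equivalence is about the return value.

-- ===== PORT A =====
-- Python dict[str, list[str]] is a List (String × List String) with unique keys (Pre_);
-- next(iter(d), None) / d[first_key] is the head pair, each dict row is built by a foldl of inserts.
def sampler_memory_records (bitstrings_by_register : List (String × List String)) : List (List (String × String)) :=
  match bitstrings_by_register with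
  | [] => []
  | (_, first) :: _ =>
    let shots := first.length
    ((List.range shots).foldl
      (fun records (shot_index : Nat) =>
        records ++ [(bitstrings_by_register.foldl
          (fun d p => d.insert p.1 (PySem.List.pyGetD p.2 ((shot_index : Nat) : Int) ""))
          PySem.Dict.empty).items])
      [])

-- ===== PORT B =====
-- Source B's `peel`: build one record from the columns' heads (col[0]), recurse on the tails (col[1:]).
def pvPeel_sampler (names : List String) : List (List String) → Nat → List (PySem.Dict String String)
  | _, 0 => []
  | columns, shots + 1 =>
    let record := (names.zip (columns.map (fun col => PySem.List.pyGetD col 0 ""))).foldl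
        (fun d p => d.insert p.1 p.2) PySem.Dict.empty
    record :: pvPeel_sampler names (columns.map (fun col => PySem.List.slice col (some 1) none)) shots

def sampler_memory_records_alt (bitstrings_by_register : List (String × List String)) : List (List (String × String)) :=
  match bitstrings_by_register with
  | [] => []
  | q :: rest =>
    let names := (q :: rest).map Prod.fst
    let columns := (q :: rest).map Prod.snd
    (pvPeel_sampler names columns q.2.length).map PySem.Dict.items

-- ===== PRECONDITION & SPEC =====
def pvShots_sampler_memory_records (bitstrings_by_register : List (String × List String)) : Nat :=
  match bitstrings_by_register with
  | [] => 0
  | (_, first) :: _ => first.length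

-- Pre_ excludes duplicate register names (a Python dict cannot contain them) and registers
-- shorter than the first one (there A raises IndexError, and B raises IndexError as well).
def Pre_sampler_memory_records (bitstrings_by_register : List (String × List String)) : Prop :=
  (bitstrings_by_register.map Prod.fst).Nodup ∧
  ∀ p ∈ bitstrings_by_register, pvShots_sampler_memory_records bitstrings_by_register ≤ p.2.length
instance (bitstrings_by_register : List (String × List String)) : Decidable (Pre_sampler_memory_records bitstrings_by_register) := by unfold Pre_sampler_memory_records; infer_instance

def pvWitness_sampler_memory_records : (List (String × List String)) :=
  [("a", ["0", "1"]), ("b", ["10", "11"])]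

def Spec_sampler_memory_records (bitstrings_by_register : List (String × List String)) (out : List (List (String × String))) : Prop := out = sampler_memory_records_alt bitstrings_by_register
instance (bitstrings_by_register : List (String × List String)) (out : List (List (String × String))) : Decidable (Spec_sampler_memory_records bitstrings_by_register out) := by unfold Spec_sampler_memory_records; infer_instance

-- ===== CLAIM (what is proved, stated in full; the proofs are below) =====
def Claim_equal_sampler_memory_records : Prop := ∀ (bitstrings_by_register : List (String × List String)), Dom_sampler_memory_records bitstrings_by_register → Pre_sampler_memory_records bitstrings_by_register → Spec_sampler_memory_records bitstrings_by_register (sampler_memory_records bitstrings_by_register)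

-- ===== LEMMAS AND PROOFS =====

-- A's append loop over range is a map.
theorem pv_foldl_append_range {α : Type} (n : Nat) (f : Nat → α) :
    (List.range n).foldl (fun acc i => acc ++ [f i]) [] = (List.range n).map f := by
  induction n with
  | zero => simp
  | succ n ih => simp [List.range_succ, ih]

-- B's peel is the index-by-index transpose.
theorem pv_peel_eq_range (names : List String) :
    ∀ (n : Nat) (columns : List (List String)),
      pvPeel_sampler names columns n
        = (List.range n).map (fun i =>
            (names.zip (columns.map (fun col => col.getD i ""))).foldl
              (fun d p => d.insert p.1 p.2) PySem.Dict.empty) := by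
  intro n
  induction n with
  | zero => intro columns; simp [pvPeel_sampler]
  | succ n ih =>
    intro columns
    rw [List.range_succ_eq_map]
    simp only [List.map_cons, List.map_map]
    rw [pvPeel_sampler, ih]
    simp only [PySem.List.slice_from_one, List.map_map, PySem.List.pyGetD_zero]
    congr 1
    apply List.map_congr_left
    intro i _
    congr 1
    congr 1
    apply List.map_congr_left
    intro col _
    simp [Function.comp]

-- ===== VERDICT (by name: the statement is the Claim_ definition above) =====
theorem sampler_memory_records_spec : Claim_equal_sampler_memory_records := by
  intro bbr _ _
  unfold Spec_sampler_memory_records sampler_memory_records sampler_memory_records_alt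
  match bbr with
  | [] => rfl
  | q :: rest =>
    simp only
    rw [pv_foldl_append_range, pv_peel_eq_range, List.map_map]
    apply List.map_congr_left
    intro i _
    simp only [Function.comp]
    congr 1
    rw [List.map_map, List.zip_map', List.foldl_map]
    simp [PySem.List.pyGetD_natCast]
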